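-- pv_equiv track=rewrite | github.com/NodeNexus/SSCODAA | backend/algorithms/tsp.py | build_cost_matrix
-- ===== SOURCE A (Python) =====
-- def build_cost_matrix(platform_names, platform_data):
--     """
--     Build cost matrix between platforms.
--     cost[i][j] = penalty for ordering from platform i then j.
--     """
--     n = len(platform_names)
--     cost = [[0] * n for _ in range(n)]
--
--     for i in range(n):
--         for j in range(n):
--             if i == j:
--                 cost[i][j] = 0
--                 continue
--             pi = platform_data.get(platform_names[i], {})
--             pj = platform_data.get(platform_names[j], {})
--             day_gap = abs(pi.get("deliveryDays", 3) - pj.get("deliveryDays", 3))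
--             cost[i][j] = day_gap * 10 + 50   # 50 = base platform switch cost
--     return cost
-- ===== SOURCE B (Python) =====
-- def build_cost_matrix(platform_names, platform_data):
--     """
--     Build cost matrix between platforms.
--     cost[i][j] = penalty for ordering from platform i then j.
--     """
--     days = [platform_data.get(nm, {}).get("deliveryDays", 3) for nm in platform_names]
--     # compress to distinct day values: vals = distinct days in first-seen order,
--     # g[i] = index of days[i] in vals
--     vals = []
--     g = []
--     for d in days:
--         if d not in vals:
--             vals.append(d)
--         g.append(vals.index(d))
--     # small template matrix over distinct values only
--     T = [[abs(u - v) * 10 + 50 for v in vals] for u in vals]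
--     n = len(days)
--     return [[0 if i == j else T[g[i]][g[j]] for j in range(n)] for i in range(n)]
-- ===== Notes on version B (the rewrite author's own statement) =====
-- stated objective: alternative
-- what changed: B compresses the delivery-day values to their distinct set (vals + index list g), computes a small k×k template matrix over distinct values only, and builds each output row by table lookup T[g[i]][g[j]] via comprehensions, instead of A's full n×n mutation loop with two dict lookups and an abs computation per cell.
import Mathlib
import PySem

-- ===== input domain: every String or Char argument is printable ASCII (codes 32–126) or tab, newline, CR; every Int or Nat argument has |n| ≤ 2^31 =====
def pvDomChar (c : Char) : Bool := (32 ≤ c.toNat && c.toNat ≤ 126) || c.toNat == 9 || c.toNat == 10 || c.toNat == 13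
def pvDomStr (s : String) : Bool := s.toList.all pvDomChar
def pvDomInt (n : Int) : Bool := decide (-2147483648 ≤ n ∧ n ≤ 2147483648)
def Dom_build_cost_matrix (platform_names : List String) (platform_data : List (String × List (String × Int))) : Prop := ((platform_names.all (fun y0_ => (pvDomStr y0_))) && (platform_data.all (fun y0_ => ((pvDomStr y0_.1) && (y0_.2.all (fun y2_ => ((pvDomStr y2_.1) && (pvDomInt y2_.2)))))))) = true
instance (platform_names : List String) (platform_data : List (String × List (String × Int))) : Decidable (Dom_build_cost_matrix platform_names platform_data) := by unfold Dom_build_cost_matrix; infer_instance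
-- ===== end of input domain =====

-- B compresses delivery days to their distinct values, computes a small template matrix over
-- distinct values only, and builds rows by table lookup — instead of A's full per-cell scan.


-- ===== PORT A =====
def build_cost_matrix (platform_names : List String) (platform_data : List (String × List (String × Int))) : List (List Int) :=
  let n := platform_names.length
  let cost : List (List Int) := List.replicate n (List.replicate n 0)
  (List.range n).foldl (fun cost i =>
    (List.range n).foldl (fun cost j =>
      if i = j then
        cost.set i ((cost[i]?.getD []).set j 0)
      else
        let pi := ((PySem.Dict.mk platform_data).get? (platform_names[i]?.getD "")).getD []
        let pj := ((PySem.Dict.mk platform_data).get? (platform_names[j]?.getD "")).getD []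
        let day_gap := |(PySem.Dict.mk pi).getD "deliveryDays" 3 - (PySem.Dict.mk pj).getD "deliveryDays" 3|
        cost.set i ((cost[i]?.getD []).set j (day_gap * 10 + 50))) cost) cost

-- ===== PORT B =====
def build_cost_matrix_alt (platform_names : List String) (platform_data : List (String × List (String × Int))) : List (List Int) :=
  let days : List Int := platform_names.map (fun nm =>
    (PySem.Dict.mk (((PySem.Dict.mk platform_data).get? nm).getD [])).getD "deliveryDays" 3)
  -- vals = distinct days in first-seen order, g[i] = index of days[i] in vals
  let vg : List Int × List Nat := days.foldl (fun p d =>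
    let vals := if d ∈ p.1 then p.1 else p.1 ++ [d]
    (vals, p.2 ++ [vals.idxOf d])) ([], [])
  let T : List (List Int) := vg.1.map (fun u => vg.1.map (fun v => |u - v| * 10 + 50))
  let n := days.length
  (List.range n).map (fun i => (List.range n).map (fun j =>
    if i = j then (0 : Int)
    else ((T[vg.2[i]?.getD 0]?.getD [])[vg.2[j]?.getD 0]?.getD 0)))

-- ===== PRECONDITION & SPEC =====
def Spec_build_cost_matrix (platform_names : List String) (platform_data : List (String × List (String × Int))) (out : List (List Int)) : Prop := out = build_cost_matrix_alt platform_names platform_data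
instance (platform_names : List String) (platform_data : List (String × List (String × Int))) (out : List (List Int)) : Decidable (Spec_build_cost_matrix platform_names platform_data out) := by unfold Spec_build_cost_matrix; infer_instance

-- ===== CLAIM (what is proved, stated in full; the proofs are below) =====
def Claim_equal_build_cost_matrix : Prop := ∀ (platform_names : List String) (platform_data : List (String × List (String × Int))), Dom_build_cost_matrix platform_names platform_data → Spec_build_cost_matrix platform_names platform_data (build_cost_matrix platform_names platform_data)

-- ===== LEMMAS AND PROOFS =====

-- delivery days of a named platform
def pvDay (platform_data : List (String × List (String × Int))) (nm : String) : Int :=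
  (PySem.Dict.mk (((PySem.Dict.mk platform_data).get? nm).getD [])).getD "deliveryDays" 3

-- intended matrix entry
def pvF (names : List String) (data : List (String × List (String × Int))) (i j : Nat) : Int :=
  if i = j then 0 else |pvDay data (names[i]?.getD "") - pvDay data (names[j]?.getD "")| * 10 + 50

-- read entry (i,j) of a matrix (0 outside)
def pvE (m : List (List Int)) (i j : Nat) : Int := (m[i]?.getD [])[j]?.getD 0

-- n×n shape
def pvShape (m : List (List Int)) (n : Nat) : Prop :=
  m.length = n ∧ ∀ r ∈ m, r.length = n

-- write v at cell (i,j)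
def pvSet (m : List (List Int)) (i j : Nat) (v : Int) : List (List Int) :=
  m.set i ((m[i]?.getD []).set j v)

theorem pvShape_set {m : List (List Int)} {n : Nat} (h : pvShape m n) {i : Nat}
    (hi : i < n) (j : Nat) (v : Int) : pvShape (pvSet m i j v) n := by
  obtain ⟨hl, hr⟩ := h
  have hi' : i < m.length := hl ▸ hi
  refine ⟨by simp [pvSet, hl], ?_⟩
  intro r hrm
  rcases List.mem_or_eq_of_mem_set hrm with h' | h'
  · exact hr _ h'
  · subst h'
    simp only [List.length_set]
    rw [List.getElem?_eq_getElem hi']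
    exact hr _ (List.getElem_mem hi')

theorem pvE_set {m : List (List Int)} {n : Nat} (h : pvShape m n) {i j : Nat}
    (hi : i < n) (hj : j < n) (v : Int) (a b : Nat) :
    pvE (pvSet m i j v) a b = if a = i ∧ b = j then v else pvE m a b := by
  obtain ⟨hl, hr⟩ := h
  have hi' : i < m.length := hl ▸ hi
  have hrow : (m[i]?.getD []).length = n := by
    rw [List.getElem?_eq_getElem hi']; exact hr _ (List.getElem_mem hi')
  have hj' : j < (m[i]?.getD []).length := by omega
  unfold pvE pvSet
  by_cases ha : a = i
  · subst ha
    rw [List.getElem?_set, if_pos rfl, if_pos hi', Option.getD_some]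
    by_cases hb : b = j
    · subst hb
      rw [List.getElem?_set, if_pos rfl, if_pos hj', Option.getD_some, if_pos ⟨rfl, rfl⟩]
    · rw [List.getElem?_set, if_neg (fun h' => hb h'.symm)]
      simp [hb]
  · rw [List.getElem?_set, if_neg (fun h' => ha h'.symm)]
    simp [ha]

theorem pvShape_init (n : Nat) : pvShape (List.replicate n (List.replicate n (0:Int))) n := by
  refine ⟨by simp, ?_⟩
  intro r hr
  rw [List.eq_of_mem_replicate hr]; simp

theorem pvE_init (n a b : Nat) : pvE (List.replicate n (List.replicate n (0:Int))) a b = 0 := by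
  unfold pvE
  rw [List.getElem?_replicate]
  split_ifs with h
  · rw [Option.getD_some, List.getElem?_replicate]; split_ifs <;> simp
  · simp

-- matrices of equal shape with equal entries are equal
theorem pv_matrix_ext {m m' : List (List Int)} {n : Nat}
    (h : pvShape m n) (h' : pvShape m' n) (he : ∀ a b, pvE m a b = pvE m' a b) : m = m' := by
  obtain ⟨hl, hr⟩ := h
  obtain ⟨hl', hr'⟩ := h'
  apply List.ext_getElem (by omega)
  intro a ha ha'
  have hrown : m[a].length = n := hr _ (List.getElem_mem ha)
  have hrown' : m'[a].length = n := hr' _ (List.getElem_mem ha')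
  apply List.ext_getElem (by omega)
  intro b hb hb'
  have := he a b
  unfold pvE at this
  rw [List.getElem?_eq_getElem ha, List.getElem?_eq_getElem ha'] at this
  simp only [Option.getD_some] at this
  rw [List.getElem?_eq_getElem hb, List.getElem?_eq_getElem hb'] at this
  simpa using this

-- Port A's inner-loop body
def stepA (names : List String) (data : List (String × List (String × Int))) (i : Nat)
    (cost : List (List Int)) (j : Nat) : List (List Int) :=
  if i = j then
    cost.set i ((cost[i]?.getD []).set j 0)
  else
    let pi := ((PySem.Dict.mk data).get? (names[i]?.getD "")).getD []
    let pj := ((PySem.Dict.mk data).get? (names[j]?.getD "")).getD []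
    let day_gap := |(PySem.Dict.mk pi).getD "deliveryDays" 3 - (PySem.Dict.mk pj).getD "deliveryDays" 3|
    cost.set i ((cost[i]?.getD []).set j (day_gap * 10 + 50))

theorem stepA_eq (names : List String) (data : List (String × List (String × Int))) (i : Nat)
    (cost : List (List Int)) (j : Nat) :
    stepA names data i cost j = pvSet cost i j (pvF names data i j) := by
  unfold stepA pvF pvSet pvDay
  by_cases h : i = j <;> simp [h]

theorem portA_eq (names : List String) (data : List (String × List (String × Int))) :
    build_cost_matrix names data =
      (List.range' 0 names.length).foldl
        (fun cost i => (List.range' 0 names.length).foldl (stepA names data i) cost)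
        (List.replicate names.length (List.replicate names.length 0)) := by
  unfold build_cost_matrix stepA
  simp only [List.range_eq_range']

-- inner loop of A fills row k over the index window [s, s+c)
theorem innerA (names : List String) (data : List (String × List (String × Int))) {n : Nat}
    {k : Nat} (hk : k < n) :
    ∀ (c s : Nat), s + c ≤ n → ∀ m, pvShape m n →
      pvShape ((List.range' s c).foldl (stepA names data k) m) n ∧
      ∀ a b, pvE ((List.range' s c).foldl (stepA names data k) m) a b =
        if a = k ∧ s ≤ b ∧ b < s + c then pvF names data a b else pvE m a b := by
  intro c
  induction c with
  | zero =>
    intro s _ m hm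
    refine ⟨hm, fun a b => ?_⟩
    rw [if_neg (by omega)]
    rfl
  | succ c ih =>
    intro s hs m hm
    have hsn : s < n := by omega
    rw [List.range'_succ, List.foldl_cons, stepA_eq]
    have hm' : pvShape (pvSet m k s (pvF names data k s)) n := pvShape_set hm hk s _
    obtain ⟨hsh, hE⟩ := ih (s + 1) (by omega) _ hm'
    refine ⟨hsh, fun a b => ?_⟩
    rw [hE a b, pvE_set hm hk hsn]
    split_ifs <;>
      first
        | rfl
        | omega
        | (obtain ⟨rfl, rfl⟩ := ‹a = _ ∧ b = _›; rfl)

-- outer loop of A fills all rows in the window [s, s+c)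
theorem outerA (names : List String) (data : List (String × List (String × Int))) {n : Nat} :
    ∀ (c s : Nat), s + c ≤ n → ∀ m, pvShape m n →
      pvShape ((List.range' s c).foldl
        (fun cost i => (List.range' 0 n).foldl (stepA names data i) cost) m) n ∧
      ∀ a b, pvE ((List.range' s c).foldl
        (fun cost i => (List.range' 0 n).foldl (stepA names data i) cost) m) a b =
        if s ≤ a ∧ a < s + c ∧ b < n then pvF names data a b else pvE m a b := by
  intro c
  induction c with
  | zero =>
    intro s _ m hm
    refine ⟨hm, fun a b => ?_⟩
    rw [if_neg (by omega)]
    rfl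
  | succ c ih =>
    intro s hs m hm
    have hsn : s < n := by omega
    rw [List.range'_succ, List.foldl_cons]
    obtain ⟨hsh1, hE1⟩ := innerA names data hsn n 0 (by omega) m hm
    obtain ⟨hsh, hE⟩ := ih (s + 1) (by omega) _ hsh1
    refine ⟨hsh, fun a b => ?_⟩
    rw [hE a b, hE1 a b]
    split_ifs <;> first | rfl | omega

-- ---- B side ----

-- B's dedup fold step
def stepV (p : List Int × List Nat) (d : Int) : List Int × List Nat :=
  let vals := if d ∈ p.1 then p.1 else p.1 ++ [d]
  (vals, p.2 ++ [vals.idxOf d])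

theorem prefix_getElem? {α : Type} {l₁ l₂ : List α} (h : l₁ <+: l₂) {k : Nat}
    (hk : k < l₁.length) : l₂[k]? = l₁[k]? := by
  obtain ⟨t, rfl⟩ := h
  rw [List.getElem?_append_left hk]

-- fold invariant: g keeps its entries, vals only grows, and each new g-entry indexes
-- the matching day value in the final vals
theorem foldV (ds : List Int) : ∀ (vals : List Int) (g : List Nat),
    g <+: (ds.foldl stepV (vals, g)).2 ∧
    vals <+: (ds.foldl stepV (vals, g)).1 ∧
    (ds.foldl stepV (vals, g)).2.length = g.length + ds.length ∧
    ∀ k, k < ds.length → ∃ m, (ds.foldl stepV (vals, g)).2[g.length + k]? = some m ∧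
      m < (ds.foldl stepV (vals, g)).1.length ∧ (ds.foldl stepV (vals, g)).1[m]? = ds[k]? := by
  induction ds with
  | nil =>
    intro vals g
    refine ⟨List.prefix_refl _, List.prefix_refl _, by simp, fun k hk => absurd hk (by simp)⟩
  | cons d rest ih =>
    intro vals g
    rw [List.foldl_cons]
    have hstep : stepV (vals, g) d =
        ((if d ∈ vals then vals else vals ++ [d]),
         g ++ [(if d ∈ vals then vals else vals ++ [d]).idxOf d]) := rfl
    set vals' := if d ∈ vals then vals else vals ++ [d] with hv
    have hdmem : d ∈ vals' := by
      by_cases h : d ∈ vals <;> simp [hv, h]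
    have hidx : vals'.idxOf d < vals'.length := List.idxOf_lt_length_of_mem hdmem
    have hget : vals'[vals'.idxOf d]? = some d := by
      rw [List.getElem?_eq_getElem hidx]
      simp [List.getElem_idxOf hidx]
    obtain ⟨hg, hvpre, hlen, hk⟩ := ih vals' (g ++ [vals'.idxOf d])
    rw [hstep]
    have hvals'pre : vals <+: vals' := by
      by_cases h : d ∈ vals <;> simp [hv, h]
    refine ⟨List.IsPrefix.trans (List.prefix_append _ _) hg,
            List.IsPrefix.trans hvals'pre hvpre, by simp at hlen ⊢; omega, ?_⟩
    intro k hk'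
    cases k with
    | zero =>
      refine ⟨vals'.idxOf d, ?_, ?_, ?_⟩
      · have : (g ++ [vals'.idxOf d])[g.length]? = some (vals'.idxOf d) := by simp
        rw [show g.length + 0 = g.length from rfl,
            prefix_getElem? hg (by simp), this]
      · have := hvpre.length_le
        omega
      · rw [prefix_getElem? hvpre hidx, hget]
        simp
    | succ k =>
      obtain ⟨m, h1, h2, h3⟩ := hk k (by simpa using Nat.lt_of_succ_lt_succ hk')
      refine ⟨m, ?_, h2, ?_⟩
      · rw [← h1]; congr 1; simp; omega
      · rw [h3]; simp

theorem portB_eq (names : List String) (data : List (String × List (String × Int))) :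
    build_cost_matrix_alt names data =
      (let days := names.map (pvDay data)
       let vg := days.foldl stepV ([], [])
       let T := vg.1.map (fun u => vg.1.map (fun v => |u - v| * 10 + 50))
       (List.range days.length).map (fun i => (List.range days.length).map (fun j =>
         if i = j then (0 : Int)
         else ((T[vg.2[i]?.getD 0]?.getD [])[vg.2[j]?.getD 0]?.getD 0)))) := by
  unfold build_cost_matrix_alt stepV pvDay
  rfl

theorem days_get (names : List String) (data : List (String × List (String × Int)))
    {i : Nat} (hi : i < names.length) :
    (names.map (pvDay data))[i]? = some (pvDay data (names[i]?.getD "")) := by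
  rw [List.getElem?_eq_getElem (by simpa using hi), List.getElem?_eq_getElem hi]
  simp

-- B's matrix entry at valid indices equals pvF
theorem entryB (names : List String) (data : List (String × List (String × Int)))
    {i j : Nat} (hi : i < names.length) (hj : j < names.length) :
    (let days := names.map (pvDay data)
     let vg := days.foldl stepV ([], [])
     let T := vg.1.map (fun u => vg.1.map (fun v => |u - v| * 10 + 50))
     if i = j then (0 : Int)
     else ((T[vg.2[i]?.getD 0]?.getD [])[vg.2[j]?.getD 0]?.getD 0)) = pvF names data i j := by
  set days := names.map (pvDay data) with hd
  have hdl : days.length = names.length := by simp [hd]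
  obtain ⟨-, -, -, hk⟩ := foldV days [] []
  by_cases hij : i = j
  · simp [pvF, hij]
  · obtain ⟨mi, hgi, hmi, hvi⟩ := hk i (by omega)
    obtain ⟨mj, hgj, hmj, hvj⟩ := hk j (by omega)
    simp only [List.length_nil, Nat.zero_add] at hgi hgj
    simp only [hgi, hgj, Option.getD_some, if_neg hij]
    set vg := days.foldl stepV (([] : List Int), ([] : List Nat))
    rw [days_get names data hi] at hvi
    rw [days_get names data hj] at hvj
    rw [List.getElem?_map, List.getElem?_eq_getElem hmi, Option.map_some, Option.getD_some,
        List.getElem?_map, List.getElem?_eq_getElem hmj, Option.map_some, Option.getD_some]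
    rw [List.getElem?_eq_getElem hmi] at hvi
    rw [List.getElem?_eq_getElem hmj] at hvj
    simp only [Option.some_inj] at hvi hvj
    simp [pvF, if_neg hij, hvi, hvj]

-- shape and entries of B's result
theorem portB_shape (names : List String) (data : List (String × List (String × Int))) :
    pvShape (build_cost_matrix_alt names data) names.length := by
  rw [portB_eq]
  refine ⟨by simp, ?_⟩
  intro r hr
  simp only [List.mem_map] at hr
  obtain ⟨i, -, rfl⟩ := hr
  simp

theorem portB_entry (names : List String) (data : List (String × List (String × Int)))
    (a b : Nat) (ha : a < names.length) (hb : b < names.length) :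
    pvE (build_cost_matrix_alt names data) a b = pvF names data a b := by
  rw [portB_eq]
  unfold pvE
  have hdl : (names.map (pvDay data)).length = names.length := by simp
  rw [List.getElem?_map, List.getElem?_range (by omega), Option.map_some, Option.getD_some,
      List.getElem?_map, List.getElem?_range (by omega), Option.map_some, Option.getD_some]
  exact entryB names data ha hb

-- ===== VERDICT (by name: the statement is the Claim_ definition above) =====
theorem build_cost_matrix_spec : Claim_equal_build_cost_matrix := by
  intro names data _
  unfold Spec_build_cost_matrix
  rw [portA_eq]
  have hinit := pvShape_init names.length
  obtain ⟨hshA, hEA⟩ := outerA names data names.length 0 (by omega) _ hinit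
  exact pv_matrix_ext hshA (portB_shape names data) (fun a b => by
    rw [hEA a b, pvE_init]
    split_ifs with h1
    · exact (portB_entry names data a b (by omega) (by omega)).symm
    · by_cases ha : a < names.length
      · by_cases hb : b < names.length
        · omega
        · unfold pvE
          rw [portB_eq]
          simp only
          have hrb : (List.range ((names.map (pvDay data)).length))[b]? = none :=
            List.getElem?_eq_none (by simpa using hb)
          rw [List.getElem?_map, List.getElem?_range (by simpa using ha), Option.map_some,
              Option.getD_some, List.getElem?_map, hrb]
          rfl
      · unfold pvE
        rw [portB_eq]
        simp only
        have hra : (List.range ((names.map (pvDay data)).length))[a]? = none :=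
          List.getElem?_eq_none (by simpa using ha)
        rw [List.getElem?_map, hra]
        rfl)
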